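-- pv_equiv track=rewrite | github.com/mahadir04/islamic-agent | Backend/app/prompt_templates.py | get_scholar_recommendation_topic
-- ===== SOURCE A (Python) =====
-- def get_scholar_recommendation_topic(question: str) -> str:
--     """Get the specific topic for scholar recommendation"""
--     question_lower = question.lower()
--
--     if any(word in question_lower for word in ['divorce', 'marriage', 'marital']):
--         return "marriage and family matters"
--     elif any(word in question_lower for word in ['inheritance', 'financial', 'money dispute']):
--         return "financial and inheritance matters"
--     elif any(word in question_lower for word in ['medical', 'health emergency', 'treatment']):
--         return "medical and health matters"
--     elif any(word in question_lower for word in ['legal', 'court', 'dispute']):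
--         return "legal matters"
--     else:
--         return "this specific Islamic ruling"
-- ===== SOURCE B (Python) =====
-- _KEYWORD_PRIORITY = {
--     'divorce': 0, 'marriage': 0, 'marital': 0,
--     'inheritance': 1, 'financial': 1, 'money dispute': 1,
--     'medical': 2, 'health emergency': 2, 'treatment': 2,
--     'legal': 3, 'court': 3, 'dispute': 3,
-- }
-- _TOPICS = [
--     "marriage and family matters",
--     "financial and inheritance matters",
--     "medical and health matters",
--     "legal matters",
-- ]
--
-- def get_scholar_recommendation_topic(question: str) -> str:
--     q = question.lower()
--     best = min((p for w, p in _KEYWORD_PRIORITY.items() if w in q), default=None)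
--     if best is None:
--         return "this specific Islamic ruling"
--     return _TOPICS[best]
-- ===== Notes on version B (the rewrite author's own statement) =====
-- stated objective: alternative
-- what changed: Instead of a short-circuiting if/elif chain over keyword groups, B scans a flat keyword-to-priority map once, takes the minimum priority among all matched keywords, and indexes a topics list; priority-min replaces branch order.
import Mathlib
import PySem

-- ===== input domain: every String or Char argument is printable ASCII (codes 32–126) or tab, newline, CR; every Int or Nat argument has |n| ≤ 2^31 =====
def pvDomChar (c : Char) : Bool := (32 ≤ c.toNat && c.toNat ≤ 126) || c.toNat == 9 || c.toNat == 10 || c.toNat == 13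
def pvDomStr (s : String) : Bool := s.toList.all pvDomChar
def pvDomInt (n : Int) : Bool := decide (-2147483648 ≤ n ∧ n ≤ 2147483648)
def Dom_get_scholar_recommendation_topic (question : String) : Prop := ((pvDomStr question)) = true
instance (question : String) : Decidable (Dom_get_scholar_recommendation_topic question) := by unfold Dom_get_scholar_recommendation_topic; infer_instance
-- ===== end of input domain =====

-- B replaces A's short-circuiting if/elif chain with one pass over a flat keyword→priority
-- map, taking the minimum matched priority and indexing a topics list (objective: alternative).

-- ===== PORT A =====
def get_scholar_recommendation_topic (question : String) : String :=
  let question_lower := PySem.Str.lower question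
  if ["divorce", "marriage", "marital"].any (fun word => PySem.Str.isIn word question_lower) then
    "marriage and family matters"
  else if ["inheritance", "financial", "money dispute"].any (fun word => PySem.Str.isIn word question_lower) then
    "financial and inheritance matters"
  else if ["medical", "health emergency", "treatment"].any (fun word => PySem.Str.isIn word question_lower) then
    "medical and health matters"
  else if ["legal", "court", "dispute"].any (fun word => PySem.Str.isIn word question_lower) then
    "legal matters"
  else
    "this specific Islamic ruling"

-- ===== PORT B =====
def pvKeywordPriority : List (String × Nat) :=
  [("divorce", 0), ("marriage", 0), ("marital", 0),
   ("inheritance", 1), ("financial", 1), ("money dispute", 1),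
   ("medical", 2), ("health emergency", 2), ("treatment", 2),
   ("legal", 3), ("court", 3), ("dispute", 3)]

def pvTopics : List String :=
  ["marriage and family matters", "financial and inheritance matters",
   "medical and health matters", "legal matters"]

-- Python's min(..., default=None) over the matched priorities, in dict order
def pvBest (q : String) : Option Nat :=
  pvKeywordPriority.foldl
    (fun acc wp =>
      if PySem.Str.isIn wp.1 q then
        match acc with
        | none => some wp.2
        | some b => some (min b wp.2)
      else acc)
    none

def get_scholar_recommendation_topic_alt (question : String) : String :=
  let q := PySem.Str.lower question
  match pvBest q with
  | none => "this specific Islamic ruling"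
  | some best => pvTopics.getD best ""  -- _TOPICS[best]: best is always 0..3, so in range

-- ===== PRECONDITION & SPEC =====
def Spec_get_scholar_recommendation_topic (question : String) (out : String) : Prop := out = get_scholar_recommendation_topic_alt question
instance (question : String) (out : String) : Decidable (Spec_get_scholar_recommendation_topic question out) := by unfold Spec_get_scholar_recommendation_topic; infer_instance

-- ===== CLAIM =====
def Claim_equal_get_scholar_recommendation_topic : Prop := ∀ (question : String), Dom_get_scholar_recommendation_topic question → Spec_get_scholar_recommendation_topic question (get_scholar_recommendation_topic question)

-- ===== LEMMAS AND PROOFS =====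

-- the fold step of pvBest, named for the lemmas below (definitionally the lambda in pvBest)
def pvStep (q : String) (acc : Option Nat) (wp : String × Nat) : Option Nat :=
  if PySem.Str.isIn wp.1 q then
    match acc with
    | none => some wp.2
    | some b => some (min b wp.2)
  else acc

theorem pvBest_eq_foldl_pvStep (q : String) :
    pvBest q = List.foldl (pvStep q) none pvKeywordPriority := rfl

-- folding one keyword group (three keywords, equal priority)
theorem pv_group_foldl (q w1 w2 w3 : String) (p : Nat) (acc : Option Nat) :
    List.foldl (pvStep q) acc [(w1, p), (w2, p), (w3, p)]
      = if [w1, w2, w3].any (fun word => PySem.Str.isIn word q) then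
          (match acc with | none => some p | some b => some (min b p))
        else acc := by
  cases acc <;>
    by_cases h1 : PySem.Str.isIn w1 q <;>
    by_cases h2 : PySem.Str.isIn w2 q <;>
    by_cases h3 : PySem.Str.isIn w3 q <;>
      (simp only [pvStep, List.foldl_cons, List.foldl_nil, List.any_cons, List.any_nil,
                  h1, h2, h3];
       try simp)

-- pvBest is the index of the first matching group (priorities are increasing)
theorem pvBest_char (q : String) :
    pvBest q =
      if ["divorce", "marriage", "marital"].any (fun word => PySem.Str.isIn word q) then some 0
      else if ["inheritance", "financial", "money dispute"].any (fun word => PySem.Str.isIn word q) then some 1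
      else if ["medical", "health emergency", "treatment"].any (fun word => PySem.Str.isIn word q) then some 2
      else if ["legal", "court", "dispute"].any (fun word => PySem.Str.isIn word q) then some 3
      else none := by
  rw [pvBest_eq_foldl_pvStep,
      show pvKeywordPriority
          = [("divorce", 0), ("marriage", 0), ("marital", 0)]
            ++ ([("inheritance", 1), ("financial", 1), ("money dispute", 1)]
            ++ ([("medical", 2), ("health emergency", 2), ("treatment", 2)]
            ++ [("legal", 3), ("court", 3), ("dispute", 3)])) from rfl,
      List.foldl_append, List.foldl_append, List.foldl_append,
      pv_group_foldl, pv_group_foldl, pv_group_foldl, pv_group_foldl]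
  split_ifs <;> rfl

-- ===== VERDICT =====
theorem get_scholar_recommendation_topic_spec : Claim_equal_get_scholar_recommendation_topic := by
  intro question _
  show get_scholar_recommendation_topic question = get_scholar_recommendation_topic_alt question
  have halt : get_scholar_recommendation_topic_alt question
      = (match pvBest (PySem.Str.lower question) with
         | none => "this specific Islamic ruling"
         | some best => pvTopics.getD best "") := rfl
  rw [halt, pvBest_char]
  show (if ["divorce", "marriage", "marital"].any
            (fun word => PySem.Str.isIn word (PySem.Str.lower question)) then
          "marriage and family matters"
        else if ["inheritance", "financial", "money dispute"].any
            (fun word => PySem.Str.isIn word (PySem.Str.lower question)) then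
          "financial and inheritance matters"
        else if ["medical", "health emergency", "treatment"].any
            (fun word => PySem.Str.isIn word (PySem.Str.lower question)) then
          "medical and health matters"
        else if ["legal", "court", "dispute"].any
            (fun word => PySem.Str.isIn word (PySem.Str.lower question)) then
          "legal matters"
        else "this specific Islamic ruling") = _
  split_ifs <;> rfl
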